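-- pv_equiv track=rewrite | github.com/dawoodaijaz97/Leetcode | number-of-zigzag-arrays-i/solution.py | solve
-- ===== SOURCE A (Python) =====
-- MOD = 10**9 + 7
--
-- def solve(n: int, l: int, r: int) -> int:
--     if n < 3 or l >= r:
--         return 0
--
--     # dp[i][j] will store the number of valid ZigZag arrays of length i ending with j
--     dp = [[0] * (r - l + 1) for _ in range(n)]
--
--     # Initialize the first element of each array
--     for j in range(l, r + 1):
--         dp[0][j - l] = 1
--
--     # Fill the DP table
--     for i in range(1, n):
--         for j in range(l, r + 1):
--             for k in range(l, r + 1):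
--                 if j != k:
--                     dp[i][j - l] += dp[i - 1][k - l]
--                     dp[i][j - l] %= MOD
--
--     # Sum up all valid arrays of length n
--     result = sum(dp[n - 1]) % MOD
--
--     return result
-- ===== SOURCE B (Python) =====
-- MOD = 10**9 + 7
--
--
-- def solve(n: int, l: int, r: int) -> int:
--     if n < 3 or l >= r:
--         return 0
--     # closed form: m choices for the first element, (m-1) for each of the
--     # remaining n-1 positions (any value different from its predecessor)
--     m = r - l + 1
--     return m * pow(m - 1, n - 1, MOD) % MOD
-- ===== Notes on version B (the rewrite author's own statement) =====
-- stated objective: simpler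
-- what changed: Replaced the DP table (each row entry summed over all previous-row entries, n rows of r-l+1 entries) with the closed form (r-l+1)*(r-l)^(n-1) mod 1e9+7 computed by built-in modular exponentiation.
import Mathlib
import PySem

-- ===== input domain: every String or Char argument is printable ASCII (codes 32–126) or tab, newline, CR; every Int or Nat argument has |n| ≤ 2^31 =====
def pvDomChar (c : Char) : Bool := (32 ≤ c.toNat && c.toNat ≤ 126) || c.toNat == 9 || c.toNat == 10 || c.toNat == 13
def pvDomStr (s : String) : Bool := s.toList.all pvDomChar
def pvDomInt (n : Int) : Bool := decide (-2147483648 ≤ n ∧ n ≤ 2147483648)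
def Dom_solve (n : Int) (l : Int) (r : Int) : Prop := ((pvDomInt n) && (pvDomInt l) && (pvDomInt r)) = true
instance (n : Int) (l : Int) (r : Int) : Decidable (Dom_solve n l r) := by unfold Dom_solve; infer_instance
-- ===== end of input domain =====

-- B replaces A's DP table with the closed form m·(m-1)^(n-1) mod p (m = r-l+1)
-- computed by modular exponentiation: a different, simpler algorithm.

-- ===== PORT A =====
def pvMOD : Int := 1000000007

-- dp is kept row by row: row0 is the initialized first row, the fold over range(1, n)
-- carries the previous row and builds row i entry by entry exactly as A's j/k loops do.
def solve (n : Int) (l : Int) (r : Int) : Int :=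
  if n < 3 ∨ l ≥ r then 0
  else
    let row0 : List Int := (PySem.List.pyRange l (r + 1) 1).map (fun _ => (1 : Int))
    let final : List Int := (PySem.List.pyRange 1 n 1).foldl (fun prev _ =>
      (PySem.List.pyRange l (r + 1) 1).map (fun j =>
        (PySem.List.pyRange l (r + 1) 1).foldl (fun acc k =>
          if j ≠ k then PySem.Int.mod (acc + PySem.List.pyGetD prev (k - l) 0) pvMOD
          else acc) 0)) row0
    PySem.Int.mod (final.foldl (· + ·) 0) pvMOD

-- ===== PORT B =====
def solve_alt (n : Int) (l : Int) (r : Int) : Int :=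
  if n < 3 ∨ l ≥ r then 0
  else PySem.Int.mod ((r - l + 1) * PySem.Int.powMod (r - l) (n - 1).toNat pvMOD) pvMOD

-- ===== PRECONDITION & SPEC =====
def Spec_solve (n : Int) (l : Int) (r : Int) (out : Int) : Prop := out = solve_alt n l r
instance (n : Int) (l : Int) (r : Int) (out : Int) : Decidable (Spec_solve n l r out) := by unfold Spec_solve; infer_instance

-- ===== CLAIM (what is proved, stated in full; the proofs are below) =====
def Claim_equal_solve : Prop := ∀ (n : Int) (l : Int) (r : Int), Dom_solve n l r → Spec_solve n l r (solve n l r)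

-- ===== LEMMAS AND PROOFS =====

theorem pvMOD_pos : (0 : Int) < pvMOD := by unfold pvMOD; norm_num

-- pulling a % out of a product's right factor
theorem mul_emod_right_emod (a b n : Int) : (a * (b % n)) % n = (a * b) % n := by
  conv_rhs => rw [Int.mul_emod]
  rw [Int.mul_emod, Int.emod_emod_of_dvd]
  exact dvd_refl n

-- A's inner k-loop: adding v once per element ≠ j, reducing mod M at every step
theorem foldl_mod_count (M v : Int) (hM : 0 < M) :
    ∀ (L : List Int) (j a : Int), 0 ≤ a → a < M →
      L.foldl (fun acc k => if j ≠ k then (acc + v) % M else acc) a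
        = (a + (L.countP (fun k => j != k) : Int) * v) % M := by
  intro L
  induction L with
  | nil =>
      intro j a ha0 haM
      simp [Int.emod_eq_of_lt ha0 haM]
  | cons k L ih =>
      intro j a ha0 haM
      by_cases h : j = k
      · subst h
        have e1 : ∀ acc : Int, (if j ≠ j then (acc + v) % M else acc) = acc := by
          intro acc; simp
        simp only [List.foldl_cons, List.countP_cons, e1]
        simpa using ih j a ha0 haM
      · have hbne : (j != k) = true := by simp [bne, h]
        simp only [List.foldl_cons, List.countP_cons, hbne, if_pos h, if_true]
        rw [ih j ((a + v) % M) (Int.emod_nonneg _ (by omega)) (Int.emod_lt_of_pos _ hM)]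
        rw [Int.emod_add_emod]
        push_cast
        ring_nf
  -- countP counts every element except (the one occurrence of) j

theorem countP_ne_of_mem {L : List Int} {j : Int} (hnd : L.Nodup) (hj : j ∈ L) :
    L.countP (fun k => j != k) = L.length - 1 := by
  have hcount : L.count j = 1 := List.count_eq_one_of_mem hnd hj
  have hsplit : L.countP (fun k => j != k) + L.count j = L.length := by
    rw [List.length_eq_countP_add_countP (p := fun k => j != k)]
    congr 1
    rw [List.count]
    apply List.countP_congr
    intro x _
    by_cases h : x = j
    · subst h; simp
    · have h2 : ¬ j = x := fun hh => h hh.symm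
      simp [h, h2]
  omega

-- one application of A's j-loop to a constant previous row
theorem step_replicate (l r : Int) (hl : l < r) (v : Int) :
    ((PySem.List.pyRange l (r + 1) 1).map (fun j =>
      (PySem.List.pyRange l (r + 1) 1).foldl (fun acc k =>
        if j ≠ k then PySem.Int.mod (acc + PySem.List.pyGetD (List.replicate (r + 1 - l).toNat v) (k - l) 0) pvMOD
        else acc) 0))
    = List.replicate (r + 1 - l).toNat (((r - l) * v) % pvMOD) := by
  have hM := pvMOD_pos
  have hmap : ∀ j ∈ PySem.List.pyRange l (r + 1) 1,
      (PySem.List.pyRange l (r + 1) 1).foldl (fun acc k =>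
        if j ≠ k then PySem.Int.mod (acc + PySem.List.pyGetD (List.replicate (r + 1 - l).toNat v) (k - l) 0) pvMOD
        else acc) 0 = ((r - l) * v) % pvMOD := by
    intro j hjmem
    rw [PySem.List.foldl_congr_mem _ _
      (fun acc k => if j ≠ k then (acc + v) % pvMOD else acc) 0 ?_]
    · rw [foldl_mod_count pvMOD v hM _ j 0 (le_refl 0) hM]
      rw [countP_ne_of_mem (PySem.List.nodup_pyRange_one l (r + 1)) hjmem]
      rw [PySem.List.length_pyRange_one]
      have : (((r + 1 - l).toNat - 1 : Nat) : Int) = r - l := by omega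
      rw [this, zero_add]
    · intro acc k hk
      rw [PySem.List.mem_pyRange_one] at hk
      have hk0 : 0 ≤ k - l := by omega
      rw [PySem.List.pyGetD_of_nonneg _ _ hk0]
      have hlt : (k - l).toNat < (r + 1 - l).toNat := by omega
      rw [List.getD_eq_getElem _ _ (by simpa using hlt)]
      simp [PySem.Int.mod_eq_emod_of_pos hM]
  rw [List.map_congr_left hmap, List.map_const', PySem.List.length_pyRange_one]

-- A's i-loop iterated t times on a constant row
theorem iterate_step (l r : Int) (hl : l < r) :
    ∀ (t : Nat) (v : Int), 0 ≤ v → v < pvMOD →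
      (fun prev => ((PySem.List.pyRange l (r + 1) 1).map (fun j =>
        (PySem.List.pyRange l (r + 1) 1).foldl (fun acc k =>
          if j ≠ k then PySem.Int.mod (acc + PySem.List.pyGetD prev (k - l) 0) pvMOD
          else acc) 0)))^[t] (List.replicate (r + 1 - l).toNat v)
      = List.replicate (r + 1 - l).toNat (((r - l) ^ t * v) % pvMOD) := by
  intro t
  induction t with
  | zero =>
      intro v hv0 hvM
      simp [Int.emod_eq_of_lt hv0 hvM]
  | succ t ih =>
      intro v hv0 hvM
      rw [Function.iterate_succ_apply]
      have hstep := step_replicate l r hl v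
      simp only [hstep]
      rw [ih _ (Int.emod_nonneg _ (by have := pvMOD_pos; omega)) (Int.emod_lt_of_pos _ pvMOD_pos)]
      rw [mul_emod_right_emod]
      ring_nf

theorem foldl_step_eq_iterate {α β : Type} (f : β → β) (L : List α) (b : β) :
    L.foldl (fun prev _ => f prev) b = f^[L.length] b := by
  induction L generalizing b with
  | nil => simp
  | cons x L ih => simpa [Function.iterate_succ_apply] using ih (f b)

theorem foldl_add_replicate (n : Nat) (v : Int) : ∀ a : Int,
    (List.replicate n v).foldl (· + ·) a = a + n * v := by
  induction n with
  | zero => intro a; simp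
  | succ k ih =>
      intro a
      simp only [List.replicate_succ, List.foldl_cons, ih]
      push_cast
      ring

-- ===== VERDICT (by name: the statement is the Claim_ definition above) =====
theorem solve_spec : Claim_equal_solve := by
  intro n l r _
  unfold Spec_solve solve solve_alt
  by_cases hc : n < 3 ∨ l ≥ r
  · simp [hc]
  · rw [if_neg hc, if_neg hc]
    obtain ⟨hn, hl⟩ := not_or.mp hc
    replace hn : 3 ≤ n := by omega
    replace hl : l < r := by omega
    have hM := pvMOD_pos
    have hrow0 : (PySem.List.pyRange l (r + 1) 1).map (fun _ => (1 : Int))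
        = List.replicate (r + 1 - l).toNat 1 := by
      rw [List.map_const', PySem.List.length_pyRange_one]
    simp only [hrow0]
    rw [foldl_step_eq_iterate]
    rw [iterate_step l r hl _ 1 (by norm_num) (by unfold pvMOD; norm_num)]
    rw [foldl_add_replicate]
    rw [PySem.List.length_pyRange_one]
    rw [PySem.Int.mod_eq_emod_of_pos hM, PySem.Int.mod_eq_emod_of_pos hM]
    rw [PySem.Int.powMod_eq_emod _ _ hM]
    simp only [zero_add, mul_one]
    have h1 : (((r + 1 - l).toNat : Int)) = r - l + 1 := by omega
    rw [h1, mul_emod_right_emod]
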